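-- pv_equiv track=rewrite | github.com/flurinh/protos | src/protos/processing/structure/gtalign.py | create_alignment_path
-- ===== SOURCE A (Python) =====
-- def create_alignment_path(query_seq, ref_seq, query_start, ref_start):
--     """
--     Create a position mapping between query and reference sequences.
--
--     Args:
--         query_seq: Query sequence with gaps (-)
--         ref_seq: Reference sequence with gaps (-)
--         query_start: Starting position of the query sequence (1-indexed)
--         ref_start: Starting position of the reference sequence (1-indexed)
--
--     Returns:
--         List of tuples (query_pos, ref_pos) where:
--         - query_pos is the position in the query (or None if gap)
--         - ref_pos is the position in the reference (or None if gap)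
--     """
--     if len(query_seq) != len(ref_seq):
--         raise ValueError(f"Sequence lengths don't match: query={len(query_seq)}, ref={len(ref_seq)}")
--
--     alignment_path = []
--     query_pos = query_start
--     ref_pos = ref_start
--
--     for q_char, r_char in zip(query_seq, ref_seq):
--         if q_char == '-' and r_char == '-':
--             # Both are gaps (shouldn't happen in valid alignments)
--             continue
--         elif q_char == '-':
--             # Gap in query
--             alignment_path.append((None, ref_pos))
--             ref_pos += 1
--         elif r_char == '-':
--             # Gap in reference
--             alignment_path.append((query_pos, None))
--             query_pos += 1
--         else:
--             # Match or mismatch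
--             alignment_path.append((query_pos, ref_pos))
--             query_pos += 1
--             ref_pos += 1
--
--     return alignment_path
-- ===== SOURCE B (Python) =====
-- def create_alignment_path(query_seq, ref_seq, query_start, ref_start):
--     if len(query_seq) != len(ref_seq):
--         raise ValueError(f"Sequence lengths don't match: query={len(query_seq)}, ref={len(ref_seq)}")
--
--     def track(seq, start):
--         coords = []
--         pos = start
--         for ch in seq:
--             if ch == '-':
--                 coords.append(None)
--             else:
--                 coords.append(pos)
--                 pos += 1
--         return coords
--
--     q_track = track(query_seq, query_start)
--     r_track = track(ref_seq, ref_start)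
--     return [(q, r) for q, r in zip(q_track, r_track) if q is not None or r is not None]
-- ===== Notes on version B (the rewrite author's own statement) =====
-- stated objective: alternative
-- what changed: B builds two independent per-column coordinate tracks (one per sequence) and then zips and filters out both-gap columns, instead of A's single four-branch loop carrying two counters and the output list together.
import Mathlib
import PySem

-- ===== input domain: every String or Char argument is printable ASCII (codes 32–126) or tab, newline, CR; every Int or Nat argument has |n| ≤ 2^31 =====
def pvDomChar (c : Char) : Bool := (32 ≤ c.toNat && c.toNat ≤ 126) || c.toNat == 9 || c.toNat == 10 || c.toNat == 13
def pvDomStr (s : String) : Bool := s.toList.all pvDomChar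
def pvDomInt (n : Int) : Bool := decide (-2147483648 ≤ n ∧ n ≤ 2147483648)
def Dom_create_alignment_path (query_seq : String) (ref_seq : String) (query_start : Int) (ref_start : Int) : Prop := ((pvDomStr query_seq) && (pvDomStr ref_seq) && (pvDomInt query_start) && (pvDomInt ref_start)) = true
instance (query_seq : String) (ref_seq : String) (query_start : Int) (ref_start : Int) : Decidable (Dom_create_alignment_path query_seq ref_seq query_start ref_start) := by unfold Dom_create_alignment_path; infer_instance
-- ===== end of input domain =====

-- B replaces A's single four-branch loop (two counters + result list in one state) by two
-- independently built coordinate tracks that are zipped and filtered; same O(n) cost ("alternative").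

-- ===== PORT A =====
-- one loop over the zipped characters, state = (path so far, query_pos, ref_pos); branches in A's order
def create_alignment_path (query_seq : String) (ref_seq : String) (query_start : Int) (ref_start : Int) : List (Option Int × Option Int) :=
  ((query_seq.toList.zip ref_seq.toList).foldl
    (fun (st : List (Option Int × Option Int) × Int × Int) qc =>
      if qc.1 = '-' ∧ qc.2 = '-' then st
      else if qc.1 = '-' then (st.1 ++ [(none, some st.2.2)], st.2.1, st.2.2 + 1)
      else if qc.2 = '-' then (st.1 ++ [(some st.2.1, none)], st.2.1 + 1, st.2.2)
      else (st.1 ++ [(some st.2.1, some st.2.2)], st.2.1 + 1, st.2.2 + 1))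
    ([], query_start, ref_start)).1

-- ===== PORT B =====
-- B's helper `track`: assign the next coordinate to every non-gap column, None to gaps
def pvTrack : List Char → Int → List (Option Int)
  | [], _ => []
  | c :: cs, pos => if c = '-' then none :: pvTrack cs pos else some pos :: pvTrack cs (pos + 1)

def create_alignment_path_alt (query_seq : String) (ref_seq : String) (query_start : Int) (ref_start : Int) : List (Option Int × Option Int) :=
  ((pvTrack query_seq.toList query_start).zip (pvTrack ref_seq.toList ref_start)).filter
    (fun p => p.1.isSome || p.2.isSome)

-- ===== PRECONDITION & SPEC =====
-- Pre_: A raises ValueError when the two sequences differ in length; B raises there too.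
def Pre_create_alignment_path (query_seq : String) (ref_seq : String) (query_start : Int) (ref_start : Int) : Prop :=
  query_seq.toList.length = ref_seq.toList.length
instance (query_seq : String) (ref_seq : String) (query_start : Int) (ref_start : Int) : Decidable (Pre_create_alignment_path query_seq ref_seq query_start ref_start) := by unfold Pre_create_alignment_path; infer_instance

def pvWitness_create_alignment_path : String × String × Int × Int := ("AB-C", "A-BC", 1, 3)

def Spec_create_alignment_path (query_seq : String) (ref_seq : String) (query_start : Int) (ref_start : Int) (out : List (Option Int × Option Int)) : Prop := out = create_alignment_path_alt query_seq ref_seq query_start ref_start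
instance (query_seq : String) (ref_seq : String) (query_start : Int) (ref_start : Int) (out : List (Option Int × Option Int)) : Decidable (Spec_create_alignment_path query_seq ref_seq query_start ref_start out) := by unfold Spec_create_alignment_path; infer_instance

-- ===== CLAIM (what is proved, stated in full; the proofs are below) =====
def Claim_equal_create_alignment_path : Prop := ∀ (query_seq : String) (ref_seq : String) (query_start : Int) (ref_start : Int), Dom_create_alignment_path query_seq ref_seq query_start ref_start → Pre_create_alignment_path query_seq ref_seq query_start ref_start → Spec_create_alignment_path query_seq ref_seq query_start ref_start (create_alignment_path query_seq ref_seq query_start ref_start)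

-- ===== LEMMAS AND PROOFS =====

-- loop invariant: A's fold with accumulator acc equals acc ++ B's zip-and-filter of the tracks
theorem pv_loop_eq (qs : List Char) : ∀ (rs : List Char) (qp rp : Int)
    (acc : List (Option Int × Option Int)), qs.length = rs.length →
    ((qs.zip rs).foldl
      (fun (st : List (Option Int × Option Int) × Int × Int) qc =>
        if qc.1 = '-' ∧ qc.2 = '-' then st
        else if qc.1 = '-' then (st.1 ++ [(none, some st.2.2)], st.2.1, st.2.2 + 1)
        else if qc.2 = '-' then (st.1 ++ [(some st.2.1, none)], st.2.1 + 1, st.2.2)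
        else (st.1 ++ [(some st.2.1, some st.2.2)], st.2.1 + 1, st.2.2 + 1))
      (acc, qp, rp)).1
    = acc ++ ((pvTrack qs qp).zip (pvTrack rs rp)).filter (fun p => p.1.isSome || p.2.isSome) := by
  induction qs with
  | nil =>
    intro rs qp rp acc h
    have : rs = [] := List.eq_nil_of_length_eq_zero h.symm
    simp [this, pvTrack]
  | cons c cs ih =>
    intro rs qp rp acc h
    cases rs with
    | nil => simp at h
    | cons r rs' =>
      simp only [List.length_cons, Nat.add_right_cancel_iff] at h
      by_cases hc : c = '-' <;> by_cases hr : r = '-'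
      · simp only [List.zip_cons_cons, List.foldl_cons, pvTrack, hc, hr, and_self, if_true]
        have := ih rs' qp rp acc h
        simpa [List.zip] using this
      · simp only [List.zip_cons_cons, List.foldl_cons, pvTrack, hc, hr, and_false, if_true]
        have := ih rs' qp (rp + 1) (acc ++ [((none : Option Int), some rp)]) h
        simp [List.zip] at this
        simp [List.zip, this, List.filter]
      · simp only [List.zip_cons_cons, List.foldl_cons, pvTrack, hc, hr, false_and, if_true]
        have := ih rs' (qp + 1) rp (acc ++ [(some qp, (none : Option Int))]) h
        simp [List.zip] at this
        simp [List.zip, this, List.filter]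
      · simp only [List.zip_cons_cons, List.foldl_cons, pvTrack, if_neg hc, if_neg hr]
        rw [if_neg (fun hab => hc hab.1)]
        have := ih rs' (qp + 1) (rp + 1) (acc ++ [(some qp, some rp)]) h
        simp [List.zip] at this
        simp [List.zip, this, List.filter]

-- ===== VERDICT (by name: the statement is the Claim_ definition above) =====
theorem create_alignment_path_spec : Claim_equal_create_alignment_path := by
  intro q r qs rs _ hpre
  unfold Spec_create_alignment_path create_alignment_path create_alignment_path_alt
  simpa using pv_loop_eq q.toList r.toList qs rs [] hpre
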